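-- pv_equiv track=rewrite | github.com/1r0nw1ll/quantum-arithmetic-research | pythagoras_quantum_world_rt/pyth2_coprime_program.py | zero_variant_terminates
-- ===== SOURCE A (Python) =====
-- def zero_variant_terminates(n: int, max_steps: int = 100) -> bool:
--     x = n
--     y = 0
--     for _ in range(max_steps):
--         if x == y:
--             return True
--         if x > y:
--             x = x - y
--         elif y > x:
--             y = y - x
--     return False
-- ===== SOURCE B (Python) =====
-- def zero_variant_terminates(n: int, max_steps: int = 100) -> bool:
--     # y starts at 0, so the subtraction steps never change the state:
--     # the loop terminates (returns True) iff n == 0 and at least one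
--     # iteration runs.  Closed form, no loop.
--     return n == 0 and max_steps >= 1
-- ===== Notes on version B (the rewrite author's own statement) =====
-- stated objective: simpler
-- what changed: Replaced the subtraction loop (in which y=0 makes every step a no-op) by the closed-form boolean n == 0 and max_steps >= 1.
import Mathlib
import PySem

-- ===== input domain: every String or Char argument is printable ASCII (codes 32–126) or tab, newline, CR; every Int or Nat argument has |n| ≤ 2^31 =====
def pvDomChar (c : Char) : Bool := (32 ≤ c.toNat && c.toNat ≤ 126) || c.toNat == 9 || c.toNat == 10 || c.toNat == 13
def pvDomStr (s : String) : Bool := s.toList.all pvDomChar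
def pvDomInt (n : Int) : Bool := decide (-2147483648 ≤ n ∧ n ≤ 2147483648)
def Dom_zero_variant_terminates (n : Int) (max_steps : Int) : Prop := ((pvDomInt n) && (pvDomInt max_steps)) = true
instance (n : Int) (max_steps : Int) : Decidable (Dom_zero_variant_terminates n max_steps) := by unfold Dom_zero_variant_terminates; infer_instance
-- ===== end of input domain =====

-- ===== PORT A =====
-- loop body of A: iterate over range(max_steps) with state (x, y); early return True on x == y
def zvtLoop : List Int → Int → Int → Bool
  | [], _, _ => false
  | _ :: rest, x, y =>
      if x == y then true
      else if x > y then zvtLoop rest (x - y) y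
      else if y > x then zvtLoop rest x (y - x)
      else zvtLoop rest x y

def zero_variant_terminates (n : Int) (max_steps : Int) : Bool :=
  zvtLoop (PySem.List.pyRange 0 max_steps 1) n 0

-- ===== PORT B =====
-- B: closed form, no iteration (y = 0 makes the loop a no-op)
def zero_variant_terminates_alt (n : Int) (max_steps : Int) : Bool :=
  n == 0 && max_steps ≥ 1

-- ===== PRECONDITION & SPEC =====
def Spec_zero_variant_terminates (n : Int) (max_steps : Int) (out : Bool) : Prop := out = zero_variant_terminates_alt n max_steps
instance (n : Int) (max_steps : Int) (out : Bool) : Decidable (Spec_zero_variant_terminates n max_steps out) := by unfold Spec_zero_variant_terminates; infer_instance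

-- ===== CLAIM (what is proved, stated in full; the proofs are below) =====
def Claim_equal_zero_variant_terminates : Prop := ∀ (n : Int) (max_steps : Int), Dom_zero_variant_terminates n max_steps → Spec_zero_variant_terminates n max_steps (zero_variant_terminates n max_steps)

-- ===== LEMMAS AND PROOFS =====

-- ===== VERDICT (by name: the statement is the Claim_ definition above) =====
-- if x < 0 and 0 ≤ y, the loop keeps x fixed and y nonnegative, hence never returns True
theorem zvtLoop_neg (l : List Int) (x : Int) (hx : x < 0) :
    ∀ y : Int, 0 ≤ y → zvtLoop l x y = false := by
  induction l with
  | nil => intro y _; rfl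
  | cons a rest ih =>
      intro y hy
      have hxy : x < y := lt_of_lt_of_le hx hy
      simp only [zvtLoop]
      rw [if_neg (by simp [ne_of_lt hxy]), if_neg (by simp [not_lt.mpr (le_of_lt hxy)]),
          if_pos (by simpa using hxy)]
      exact ih (y - x) (by omega)

-- if x > 0, the state (x, 0) is a fixed point of the loop body, so the loop never returns True
theorem zvtLoop_pos (l : List Int) (x : Int) (hx : 0 < x) :
    zvtLoop l x 0 = false := by
  induction l with
  | nil => rfl
  | cons a rest ih =>
      simp only [zvtLoop]
      rw [if_neg (by simp [ne_of_gt hx]), if_pos (by simpa using hx)]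
      simpa using ih

theorem zero_variant_terminates_spec : Claim_equal_zero_variant_terminates := by
  intro n m _
  unfold Spec_zero_variant_terminates zero_variant_terminates zero_variant_terminates_alt
  rcases lt_trichotomy m 1 with hm | hm | hm
  · rw [PySem.List.pyRange_one_eq_nil (by omega)]
    simp [zvtLoop]
    omega
  all_goals
    rw [PySem.List.pyRange_one_cons (by omega)]
    rcases lt_trichotomy n 0 with hn | hn | hn
    · rw [zvtLoop_neg _ n hn 0 le_rfl]; simp; omega
    · subst hn; simp [zvtLoop]; omega
    · rw [zvtLoop_pos _ n hn]; simp; omega
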